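-- pv_equiv track=rewrite | github.com/SVUCTF/SVUCTF-WINTER-2023 | challenges/misc/midi/build/gen.py | to_charcodes_in_base7
-- ===== SOURCE A (Python) =====
-- from typing import List
--
-- def to_charcodes_in_base7(input: str) -> List[str]:
--     output = []
--     for char in input:
--         code = ord(char)
--         base7_digits = []
--         while code > 0:
--             remainder = code % 7
--             base7_digits.insert(0, str(remainder))
--             code //= 7
--         output.append("".join(base7_digits))
--     return output
-- ===== SOURCE B (Python) =====
-- from typing import List
--
-- def to_charcodes_in_base7(input: str) -> List[str]:
--     def to_base7(code: int) -> str: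
--         if code == 0:
--             return ""
--         return to_base7(code // 7) + str(code % 7)
--     return [to_base7(ord(char)) for char in input]
-- ===== Notes on version B (the rewrite author's own statement) =====
-- stated objective: simpler
-- what changed: Replaces the imperative while-loop that builds each digit list front-loaded with insert(0) plus a join by a recursive helper producing the base-7 string most-significant-first directly, and the outer accumulator loop by a list comprehension.
import Mathlib
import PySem

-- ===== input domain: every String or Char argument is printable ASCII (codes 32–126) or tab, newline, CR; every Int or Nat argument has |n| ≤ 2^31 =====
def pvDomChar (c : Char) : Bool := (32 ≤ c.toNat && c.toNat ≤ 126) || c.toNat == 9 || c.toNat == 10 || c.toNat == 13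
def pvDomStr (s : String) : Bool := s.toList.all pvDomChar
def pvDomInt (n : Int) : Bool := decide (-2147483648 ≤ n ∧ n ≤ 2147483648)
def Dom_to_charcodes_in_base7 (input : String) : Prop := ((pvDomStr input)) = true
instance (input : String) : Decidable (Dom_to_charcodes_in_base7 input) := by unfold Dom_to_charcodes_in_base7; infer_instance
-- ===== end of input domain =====

-- B replaces the insert(0)-list-plus-join while-loop with a recursive most-significant-first
-- digit-string helper and a list comprehension (objective: simpler).

-- ===== PORT A =====
-- inner `while code > 0` loop; `code = ord(char) ≥ 0`, so Python's `%` and `//` agree with Nat `%`/`/`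
def pvDigitsLoop (code : Nat) (base7_digits : List String) : List String :=
  if code > 0 then
    pvDigitsLoop (code / 7) (PySem.Int.toStr ((code % 7 : Nat) : Int) :: base7_digits)
  else base7_digits

def to_charcodes_in_base7 (input : String) : List String :=
  input.toList.foldl
    (fun output char => output ++ [PySem.Str.join "" (pvDigitsLoop char.toNat [])]) []

-- ===== PORT B =====
def pvToBase7 (code : Nat) : String :=
  if code = 0 then "" else pvToBase7 (code / 7) ++ PySem.Int.toStr ((code % 7 : Nat) : Int)

def to_charcodes_in_base7_alt (input : String) : List String :=
  input.toList.map (fun char => pvToBase7 char.toNat)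

-- ===== PRECONDITION & SPEC =====
def Spec_to_charcodes_in_base7 (input : String) (out : List String) : Prop := out = to_charcodes_in_base7_alt input
instance (input : String) (out : List String) : Decidable (Spec_to_charcodes_in_base7 input out) := by unfold Spec_to_charcodes_in_base7; infer_instance

-- ===== CLAIM (what is proved, stated in full; the proofs are below) =====
def Claim_equal_to_charcodes_in_base7 : Prop := ∀ (input : String), Dom_to_charcodes_in_base7 input → Spec_to_charcodes_in_base7 input (to_charcodes_in_base7 input)

-- ===== LEMMAS AND PROOFS =====

theorem pv_flat_inter (a : List (List Char)) :
    (List.intersperse ([] : List Char) a).flatten = a.flatten := by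
  induction a with
  | nil => simp
  | cons x t ih =>
    cases t with
    | nil => simp
    | cons y s => simp [List.intersperse] at ih ⊢; simp [ih]

theorem pv_join_nil_cons (s : String) (l : List String) :
    PySem.Str.join "" (s :: l) = s ++ PySem.Str.join "" l := by
  simp [PySem.Str.join, PySem.Chars.join, List.intercalate, pv_flat_inter]

theorem pv_loop_inv (code : Nat) (acc : List String) :
    PySem.Str.join "" (pvDigitsLoop code acc) = pvToBase7 code ++ PySem.Str.join "" acc := by
  induction code using Nat.strong_induction_on generalizing acc with
  | _ code ih =>
    rw [pvDigitsLoop]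
    by_cases h : code > 0
    · rw [if_pos h, ih (code / 7) (Nat.div_lt_self h (by norm_num)), pv_join_nil_cons,
        ← String.append_assoc]
      conv_rhs => rw [pvToBase7, if_neg (Nat.pos_iff_ne_zero.mp h)]
    · rw [if_neg h]
      conv_rhs => rw [pvToBase7, if_pos (Nat.eq_zero_of_not_pos h)]
      simp

theorem pv_foldl_append_map {α β : Type} (f : α → β) (l : List α) (out : List β) :
    l.foldl (fun o c => o ++ [f c]) out = out ++ l.map f := by
  induction l generalizing out with
  | nil => simp
  | cons c t ih => simp [ih]

-- ===== VERDICT (by name: the statement is the Claim_ definition above) =====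
theorem to_charcodes_in_base7_spec : Claim_equal_to_charcodes_in_base7 := by
  intro input _
  unfold Spec_to_charcodes_in_base7 to_charcodes_in_base7 to_charcodes_in_base7_alt
  rw [pv_foldl_append_map]
  simp only [List.nil_append]
  refine List.map_congr_left ?_
  intro c _
  have h := pv_loop_inv c.toNat []
  simpa [PySem.Str.join, PySem.Chars.join, List.intercalate] using h
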